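-- pv_equiv track=rewrite | github.com/minjo1234/Progrmmers_Problems | LV1/Fruit_Sale.py | solution
-- ===== SOURCE A (Python) =====
-- def solution(k, m, score):
--     answer = 0
--     box = len(score) // m
--     for i in range(box):
--         for j in range(m):
--             if j == m - 1 :
--                 answer += max(score) * m
--             score.pop(score.index(max(score)))
--     return answer
-- ===== SOURCE B (Python) =====
-- def solution(k, m, score):
--     s = sorted(score, reverse=True)
--     box = len(s) // m
--     return m * sum(s[i * m + m - 1] for i in range(box))
-- ===== Notes on version B (the rewrite author's own statement) =====
-- stated objective: faster
-- what changed: Replaces the repeated max/index/pop scans (quadratic) by one descending sort and a direct sum of every m-th element (the minimum of each full box) times m.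
import Mathlib
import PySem

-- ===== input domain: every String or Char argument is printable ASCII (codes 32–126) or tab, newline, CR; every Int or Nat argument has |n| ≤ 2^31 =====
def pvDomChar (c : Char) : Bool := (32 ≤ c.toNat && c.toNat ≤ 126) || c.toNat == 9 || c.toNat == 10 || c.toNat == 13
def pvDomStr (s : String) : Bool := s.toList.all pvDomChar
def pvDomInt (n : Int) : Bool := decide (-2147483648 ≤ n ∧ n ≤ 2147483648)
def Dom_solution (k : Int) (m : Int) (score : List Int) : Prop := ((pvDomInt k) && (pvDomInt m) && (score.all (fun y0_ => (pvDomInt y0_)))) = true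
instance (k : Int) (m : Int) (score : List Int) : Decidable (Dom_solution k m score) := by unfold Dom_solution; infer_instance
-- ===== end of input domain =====

-- B replaces A's repeated max/index/pop scans by one descending sort and a direct sum of
-- every m-th element times m (faster algorithm). A pops the elements of all full boxes
-- from `score` in place; the equivalence proved here is about the RETURN value only
-- (B does not mutate its argument).

-- ===== PORT A =====
-- max(score): Python's max; the default 0 is unreachable under Pre_ (the list is never
-- empty when A calls max).
def pvMaxA (xs : List Int) : Int := (PySem.List.max? xs (fun y => y)).getD 0
-- score.pop(score.index(max(score))): the fallback arms are unreachable under Pre_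
-- (the max exists, its index exists and is in range).
def pvPopMaxA (xs : List Int) : List Int :=
  match PySem.List.max? xs (fun y => y) with
  | none => xs
  | some mx =>
    match PySem.List.index? xs mx with
    | none => xs
    | some idx =>
      match PySem.List.pop? xs (idx : Int) with
      | none => xs
      | some r => r.2

def solution (k : Int) (m : Int) (score : List Int) : Int :=
  let box := PySem.Int.floordiv (score.length : Int) m
  let st :=
    (PySem.List.pyRange 0 box 1).foldl
      (fun st _i =>
        (PySem.List.pyRange 0 m 1).foldl
          (fun st j =>
            (if j = m - 1 then st.1 + pvMaxA st.2 * m else st.1, pvPopMaxA st.2))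
          st)
      (0, score)
  st.1

-- ===== PORT B =====
def solution_alt (k : Int) (m : Int) (score : List Int) : Int :=
  let s := PySem.List.sorted score (fun y => y) true
  let box := PySem.Int.floordiv (s.length : Int) m
  m * (PySem.List.pyRange 0 box 1).foldl
        (fun acc i => acc + (PySem.List.pyGet? s (i * m + m - 1)).getD 0) 0

-- ===== PRECONDITION & SPEC =====
-- Pre_ excludes exactly m = 0, where A raises ZeroDivisionError on `len(score) // m`.
def Pre_solution (k : Int) (m : Int) (score : List Int) : Prop := m ≠ 0
instance (k : Int) (m : Int) (score : List Int) : Decidable (Pre_solution k m score) := by unfold Pre_solution; infer_instance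
def pvWitness_solution : Int × Int × List Int := (4, 3, [1, 2, 3, 1, 2])

def Spec_solution (k : Int) (m : Int) (score : List Int) (out : Int) : Prop := out = solution_alt k m score
instance (k : Int) (m : Int) (score : List Int) (out : Int) : Decidable (Spec_solution k m score out) := by unfold Spec_solution; infer_instance

-- ===== CLAIM (what is proved, stated in full; the proofs are below) =====
def Claim_equal_solution : Prop := ∀ (k : Int) (m : Int) (score : List Int), Dom_solution k m score → Pre_solution k m score → Spec_solution k m score (solution k m score)

-- ===== LEMMAS AND PROOFS =====

-- One pop: on a list permuting the suffix s.drop t of the descending-sorted s,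
-- Python's max is the value s[t] and popping its first occurrence leaves a
-- permutation of s.drop (t+1).
theorem pop_step (s : List Int) (hs : s.Pairwise (fun a b => b ≤ a)) (t : Nat)
    (ht : t < s.length) (xs : List Int) (hp : xs.Perm (s.drop t)) :
    pvMaxA xs = s[t] ∧ (pvPopMaxA xs).Perm (s.drop (t+1)) := by
  have hd : s.drop t = s[t] :: s.drop (t+1) := List.drop_eq_getElem_cons ht
  have hne : xs ≠ [] := by
    intro h
    have := hp.length_eq
    rw [h, hd] at this
    simp at this
    omega
  obtain ⟨mx, hmx⟩ : ∃ mx, PySem.List.max? xs (fun y => y) = some mx := by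
    cases h : PySem.List.max? xs (fun y => y) with
    | none => exact absurd ((PySem.List.max?_eq_none_iff xs (fun y => y)).mp h) hne
    | some mx => exact ⟨mx, rfl⟩
  have hmem : mx ∈ xs := PySem.List.max?_mem hmx
  have hmax : ∀ y ∈ xs, y ≤ mx := fun y hy => PySem.List.max?_isMax hmx y hy
  have h1 : s[t] ≤ mx := hmax _ (hp.mem_iff.mpr (by rw [hd]; exact List.mem_cons_self))
  have h2 : mx ≤ s[t] := by
    have hmem' : mx ∈ s.drop t := hp.mem_iff.mp hmem
    rw [hd] at hmem'
    rcases List.mem_cons.mp hmem' with h | h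
    · exact le_of_eq h
    · have hpw : (s.drop t).Pairwise (fun a b : Int => b ≤ a) := hs.sublist (List.drop_sublist t s)
      rw [hd, List.pairwise_cons] at hpw
      exact hpw.1 mx h
  have heq : mx = s[t] := le_antisymm h2 h1
  constructor
  · simp [pvMaxA, hmx, heq]
  · obtain ⟨idx, hidx⟩ : ∃ idx, PySem.List.index? xs mx = some idx :=
      Option.isSome_iff_exists.mp ((PySem.List.index?_isSome_iff xs mx).mpr hmem)
    obtain ⟨hk, hget, hpre⟩ := PySem.List.getElem_of_index?_eq_some hidx
    have hpop : PySem.List.pop? xs (idx : Int) = some (xs[idx], xs.eraseIdx idx) :=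
      PySem.List.pop?_natCast xs idx hk
    have hres : pvPopMaxA xs = xs.eraseIdx idx := by
      unfold pvPopMaxA
      simp only [hmx, hidx, hpop]
    rw [hres]
    obtain ⟨pre, suf, hxs, hlen, hnp⟩ := (PySem.List.index?_eq_some_iff xs mx idx).mp hidx
    have herase : xs.eraseIdx idx = pre ++ suf := by
      rw [hxs, ← hlen]
      simp [List.eraseIdx_append_of_length_le]
    rw [herase]
    have hmid : (pre ++ mx :: suf).Perm (mx :: (pre ++ suf)) := List.perm_middle
    have : (mx :: (pre ++ suf)).Perm (mx :: s.drop (t+1)) := by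
      refine (hmid.symm.trans ?_)
      rw [← hxs, heq, ← hd]
      exact hp
    rw [heq] at this
    exact this.cons_inv

theorem foldl_const_iterate {α β : Type} (h : α → α) (L : List β) (x : α) :
    L.foldl (fun x _ => h x) x = h^[L.length] x := by
  induction L generalizing x with
  | nil => rfl
  | cons y L ih => simp [List.foldl_cons, ih, Function.iterate_succ_apply]

theorem popIter_perm (s : List Int) (hs : s.Pairwise (fun a b => b ≤ a)) :
    ∀ (n t : Nat) (xs : List Int), xs.Perm (s.drop t) → t + n ≤ s.length →
    (pvPopMaxA^[n] xs).Perm (s.drop (t + n)) := by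
  intro n
  induction n with
  | zero => intro t xs hp _; simpa using hp
  | succ n ih =>
    intro t xs hp hlen
    have ht : t < s.length := by omega
    have step := (pop_step s hs t ht xs hp).2
    have := ih (t + 1) (pvPopMaxA xs) step (by omega)
    rw [Function.iterate_succ_apply]
    convert this using 2
    omega

-- One box of A's inner loop: m pops, adding max*m at the last one.
theorem inner_box (s : List Int) (hs : s.Pairwise (fun a b => b ≤ a)) (m : Int) (hm : 0 < m)
    (t : Nat) (a : Int) (xs : List Int) (hp : xs.Perm (s.drop t)) (hlen : t + m.toNat ≤ s.length) :
    ((PySem.List.pyRange 0 m 1).foldl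
        (fun st j => (if j = m - 1 then st.1 + pvMaxA st.2 * m else st.1, pvPopMaxA st.2)) (a, xs)).1
      = a + s.getD (t + m.toNat - 1) 0 * m
    ∧ ((PySem.List.pyRange 0 m 1).foldl
        (fun st j => (if j = m - 1 then st.1 + pvMaxA st.2 * m else st.1, pvPopMaxA st.2)) (a, xs)).2.Perm
        (s.drop (t + m.toNat)) := by
  have hsplit : PySem.List.pyRange 0 m 1 = PySem.List.pyRange 0 (m - 1) 1 ++ [m - 1] := by
    have := PySem.List.pyRange_one_succ_right (a := 0) (b := m - 1) (by omega)
    simpa using this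
  rw [hsplit, List.foldl_append]
  have hcongr : (PySem.List.pyRange 0 (m-1) 1).foldl
      (fun st j => (if j = m - 1 then st.1 + pvMaxA st.2 * m else st.1, pvPopMaxA st.2)) (a, xs)
      = (PySem.List.pyRange 0 (m-1) 1).foldl
      (fun (st : Int × List Int) _ => (st.1, pvPopMaxA st.2)) (a, xs) := by
    apply PySem.List.foldl_congr_mem
    intro acc x hx
    have := PySem.List.mem_pyRange_one.mp hx
    have : x ≠ m - 1 := by omega
    simp [this]
  rw [hcongr]
  rw [PySem.List.foldl_prod_mk (f := fun x _ => x) (g := fun x _ => pvPopMaxA x)]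
  rw [PySem.List.foldl_ignore, foldl_const_iterate]
  set n := (PySem.List.pyRange 0 (m-1) 1).length with hn
  have hnval : n = m.toNat - 1 := by
    rw [hn, PySem.List.length_pyRange_one]
    omega
  have hy : (pvPopMaxA^[n] xs).Perm (s.drop (t + n)) :=
    popIter_perm s hs n t xs hp (by omega)
  have ht' : t + n < s.length := by omega
  have hstep := pop_step s hs (t + n) ht' _ hy
  simp only [List.foldl_cons, List.foldl_nil]
  have hidx : t + n = t + m.toNat - 1 := by omega
  constructor
  · rw [if_pos trivial, hstep.1,
      List.getD_eq_getElem _ _ (by omega : t + m.toNat - 1 < s.length),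
      getElem_congr rfl hidx ht']
  · have h2 := hstep.2
    have : t + n + 1 = t + m.toNat := by omega
    rwa [this] at h2

-- b boxes of A's loop, starting from a permutation of the suffix s.drop t.
theorem outer_iter (s : List Int) (hs : s.Pairwise (fun a b => b ≤ a)) (m : Int) (hm : 0 < m) :
    ∀ (b t : Nat) (a : Int) (xs : List Int), xs.Perm (s.drop t) → t + b * m.toNat ≤ s.length →
    ((fun st : Int × List Int => (PySem.List.pyRange 0 m 1).foldl
        (fun st j => (if j = m - 1 then st.1 + pvMaxA st.2 * m else st.1, pvPopMaxA st.2)) st)^[b] (a, xs)).1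
      = a + ((List.range b).map (fun i => s.getD (t + i * m.toNat + m.toNat - 1) 0 * m)).sum
    ∧ ((fun st : Int × List Int => (PySem.List.pyRange 0 m 1).foldl
        (fun st j => (if j = m - 1 then st.1 + pvMaxA st.2 * m else st.1, pvPopMaxA st.2)) st)^[b] (a, xs)).2.Perm
        (s.drop (t + b * m.toNat)) := by
  intro b
  induction b with
  | zero => intro t a xs hp _; simpa using hp
  | succ b ih =>
    intro t a xs hp hlen
    rw [Function.iterate_succ_apply]
    have hmn : t + m.toNat ≤ s.length := by
      have : m.toNat ≤ (b + 1) * m.toNat := Nat.le_mul_of_pos_left _ (by omega)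
      omega
    have hstep := inner_box s hs m hm t a xs hp hmn
    set p := (PySem.List.pyRange 0 m 1).foldl
        (fun st j => (if j = m - 1 then st.1 + pvMaxA st.2 * m else st.1, pvPopMaxA st.2)) (a, xs) with hpdef
    have hnext : t + m.toNat + b * m.toNat ≤ s.length := by
      have : (b + 1) * m.toNat = b * m.toNat + m.toNat := by ring
      omega
    have := ih (t + m.toNat) p.1 p.2 hstep.2 hnext
    rw [Prod.mk.eta] at this
    refine ⟨?_, ?_⟩
    · rw [this.1, hstep.1]
      rw [List.range_succ_eq_map, List.map_cons, List.sum_cons, List.map_map]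
      have hmap : ((List.range b).map ((fun i => s.getD (t + i * m.toNat + m.toNat - 1) 0 * m) ∘ Nat.succ))
          = (List.range b).map (fun i => s.getD (t + m.toNat + i * m.toNat + m.toNat - 1) 0 * m) := by
        apply List.map_congr_left
        intro i _
        simp only [Function.comp]
        have h1 : Nat.succ i * m.toNat = i * m.toNat + m.toNat := Nat.succ_mul i m.toNat
        rw [h1]
        have h2 : t + (i * m.toNat + m.toNat) + m.toNat - 1
            = t + m.toNat + i * m.toNat + m.toNat - 1 := by
          set q := i * m.toNat
          omega
        rw [h2]
      rw [hmap]
      have h0 : t + 0 * m.toNat + m.toNat - 1 = t + m.toNat - 1 := by omega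
      rw [h0]
      ring
    · have h3 : t + m.toNat + b * m.toNat = t + (b + 1) * m.toNat := by
        have : (b + 1) * m.toNat = b * m.toNat + m.toNat := by ring
        omega
      rw [← h3]
      exact this.2

theorem main_eq (k : Int) (m : Int) (score : List Int) (hm : m ≠ 0) :
    solution k m score = solution_alt k m score := by
  simp only [solution, solution_alt]
  set s := PySem.List.sorted score (fun y => y) true with hsdef
  have hlen : s.length = score.length := PySem.List.length_sorted score _ true
  rw [hlen]
  rcases lt_or_gt_of_ne hm with hneg | hpos
  · -- m < 0 : box ≤ 0, both loops are empty, both sides are 0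
    have h1 := PySem.Int.floordiv_mul_add_mod (score.length : Int) m
    have h2 := PySem.Int.mod_neg_bounds (score.length : Int) hneg
    have hbox : PySem.Int.floordiv (score.length : Int) m ≤ 0 := by
      by_contra h
      have hq : 1 ≤ PySem.Int.floordiv (score.length : Int) m := by omega
      nlinarith [Int.natCast_nonneg score.length]
    rw [PySem.List.pyRange_one_eq_nil hbox]
    simp
  · -- m > 0
    have hmn : ((m.toNat : Int)) = m := Int.toNat_of_nonneg (le_of_lt hpos)
    set mn := m.toNat with hmndef
    have hmn1 : 1 ≤ mn := by omega
    set b := score.length / mn with hbdef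
    have hbox : PySem.Int.floordiv (score.length : Int) m = (b : Int) := by
      rw [← hmn]
      exact PySem.Int.floordiv_natCast score.length mn
    rw [hbox]
    have hrange : PySem.List.pyRange 0 (b : Int) 1 = (List.range b).map (fun k : Nat => (k : Int)) := by
      have h0 : ((b : Int) - 0).toNat = b := by simp
      rw [PySem.List.pyRange_one, h0]
      apply List.map_congr_left
      intro x _
      simp
    rw [hrange]
    have hbmn : b * mn ≤ s.length := by
      rw [hlen]
      exact Nat.div_mul_le_self score.length mn
    have hs : s.Pairwise (fun a b => b ≤ a) := PySem.List.sorted_pairwise_rev score (fun y => y)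
    -- A side: the outer loop ignores its index, so it is b iterations of one box
    have hA : (List.foldl
        (fun st _i => (PySem.List.pyRange 0 m 1).foldl
          (fun st j => (if j = m - 1 then st.1 + pvMaxA st.2 * m else st.1, pvPopMaxA st.2)) st)
        ((0 : Int), score) ((List.range b).map (fun k : Nat => (k : Int)))).1
        = ((List.range b).map (fun i => s.getD (i * mn + mn - 1) 0 * m)).sum := by
      rw [foldl_const_iterate, List.length_map, List.length_range]
      have hperm0 : score.Perm (s.drop 0) := by
        simp [hsdef, (PySem.List.sorted_perm score (fun y => y) true).symm]
      rw [(outer_iter s hs m hpos b 0 0 score hperm0 (by simpa using hbmn)).1]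
      simp only [zero_add]
      rfl
    rw [hA]
    -- B side
    rw [PySem.List.foldl_add]
    rw [List.map_map]
    have hB : ((List.range b).map ((fun i => (PySem.List.pyGet? s (i * m + m - 1)).getD 0) ∘ (fun k : Nat => ((k : Int)))))
        = (List.range b).map (fun k => s.getD (k * mn + mn - 1) 0) := by
      apply List.map_congr_left
      intro kk hk
      rw [List.mem_range] at hk
      simp only [Function.comp]
      have hidx : ((kk : Int)) * m + m - 1 = ((kk * mn + mn - 1 : Nat) : Int) := by
        rw [← hmn]
        push_cast [Nat.cast_sub (show 1 ≤ kk * mn + mn from le_trans hmn1 (Nat.le_add_left mn _))]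
        ring
      rw [hidx, PySem.List.pyGet?_natCast]
      have hlt : kk * mn + mn - 1 < s.length := by
        have h5 : (kk + 1) * mn ≤ b * mn := Nat.mul_le_mul_right mn (by omega)
        have h6 : (kk + 1) * mn = kk * mn + mn := by ring
        omega
      rw [List.getElem?_eq_getElem hlt, List.getD_eq_getElem _ _ hlt]
      rfl
    rw [hB]
    rw [List.sum_map_mul_right]
    ring

-- ===== VERDICT (by name: the statement is the Claim_ definition above) =====
theorem solution_spec : Claim_equal_solution := by
  intro k m score _hdom hpre
  unfold Spec_solution
  exact main_eq k m score hpre
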